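-- pv_equiv track=rewrite | github.com/thuongton999/hacksphere | utils/AI_judging/ai_judge.py | _find_section_boundary
-- ===== SOURCE A (Python) =====
-- from typing import Dict, List, Optional, Any
--
-- def _find_section_boundary(text: str, indicators: List[str], start_pos: int, end_pos: int) -> int:
--     """Find the end boundary of a section based on indicators"""
--     text_segment = text[start_pos:end_pos].lower()
--
--     for indicator in indicators:
--         pos = text_segment.find(indicator)
--         if pos != -1:
--             # Look for sentence or paragraph boundaries after the indicator
--             actual_pos = start_pos + pos
--             # Find the next sentence boundary (period, exclamation, question mark)
--             for i in range(actual_pos + len(indicator), min(len(text), actual_pos + 300)):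
--                 if text[i] in '.!?':
--                     return i + 1
--             # If no sentence boundary found, return position after indicator
--             return actual_pos + len(indicator) + 100
--
--     return end_pos
-- ===== SOURCE B (Python) =====
-- def _find_section_boundary(text, indicators, start_pos, end_pos):
--     """Find the end boundary of a section based on indicators"""
--     segment = text[start_pos:end_pos].lower()
--     # index of ALL sentence-boundary positions in text, built once up front
--     boundaries = [i for i, ch in enumerate(text) if ch in '.!?']
--     for indicator in indicators:
--         pos = segment.find(indicator)
--         if pos == -1:
--             continue
--         lo = start_pos + pos + len(indicator)
--         hi = min(len(text), start_pos + pos + 300)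
--         # binary search: first boundary position >= lo
--         a, b = 0, len(boundaries)
--         while a < b:
--             m = (a + b) // 2
--             if boundaries[m] < lo:
--                 a = m + 1
--             else:
--                 b = m
--         if a < len(boundaries) and boundaries[a] < hi:
--             return boundaries[a] + 1
--         return lo + 100
--     return end_pos
-- ===== Notes on version B (the rewrite author's own statement) =====
-- stated objective: alternative
-- what changed: B precomputes a sorted index of ALL sentence-boundary positions ('.!?') in text in one pass, then replaces A's character-by-character forward scan with a hand-rolled binary search (bisect_left) over that index to find the first boundary at or after the indicator, checking it against the 300-char window; A's indicator loop, +1, +100 and end_pos fallbacks are kept.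
-- outside the precondition, e.g. on _find_section_boundary('abc.def', ['c'], -5, 7): A returns -3, B returns 4; on _find_section_boundary('abc.def', ['b'], -100, 7): A raises IndexError, B returns 4
import Mathlib
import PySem

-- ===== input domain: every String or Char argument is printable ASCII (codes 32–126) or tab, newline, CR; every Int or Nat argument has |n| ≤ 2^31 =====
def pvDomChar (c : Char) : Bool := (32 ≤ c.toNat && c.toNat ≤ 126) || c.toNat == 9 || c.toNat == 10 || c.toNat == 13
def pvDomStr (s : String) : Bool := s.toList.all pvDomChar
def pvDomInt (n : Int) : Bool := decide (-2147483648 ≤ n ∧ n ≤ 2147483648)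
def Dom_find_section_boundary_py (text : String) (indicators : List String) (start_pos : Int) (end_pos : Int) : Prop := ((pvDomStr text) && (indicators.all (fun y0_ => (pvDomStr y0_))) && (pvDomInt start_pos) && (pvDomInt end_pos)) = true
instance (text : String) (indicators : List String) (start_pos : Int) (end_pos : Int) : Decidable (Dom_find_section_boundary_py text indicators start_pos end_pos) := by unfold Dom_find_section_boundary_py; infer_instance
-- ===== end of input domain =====

-- B precomputes the sorted index of all sentence-boundary positions in text and replaces
-- A's character-by-character forward scan with a binary search over that index
-- ('alternative', not claimed faster). Equality of the RETURN value is proved for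
-- 0 ≤ start_pos (see Pre_ below).

-- ===== PORT A =====
-- the inner 'for i in range(lo, hi): if text[i] in ".!?": return i + 1' scan;
-- text[i] is in range whenever 0 ≤ start_pos (Pre_), so pyGetD is exact there
def pvScanA (cs : List Char) : List Int → Option Int
  | [] => none
  | i :: rest =>
      if PySem.Chars.isIn [PySem.List.pyGetD cs i ' '] ['.', '!', '?'] then some (i + 1)
      else pvScanA cs rest

-- the 'for indicator in indicators' loop of A
def pvLoopA (cs seg : List Char) (start_pos end_pos : Int) : List String → Int
  | [] => end_pos
  | ind :: rest =>
      let pos := PySem.Chars.find seg ind.toList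
      if pos ≠ -1 then
        let actual_pos := start_pos + pos
        match pvScanA cs (PySem.List.pyRange (actual_pos + (ind.toList.length : Int))
            (min (cs.length : Int) (actual_pos + 300)) 1) with
        | some r => r
        | none => actual_pos + (ind.toList.length : Int) + 100
      else pvLoopA cs seg start_pos end_pos rest

def find_section_boundary_py (text : String) (indicators : List String) (start_pos : Int) (end_pos : Int) : Int :=
  pvLoopA text.toList
    (PySem.Chars.lower (PySem.Chars.slice text.toList (some start_pos) (some end_pos)))
    start_pos end_pos indicators

-- ===== PORT B =====
-- boundaries = [i for i, ch in enumerate(text) if ch in '.!?']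
def pvBounds (cs : List Char) : List Int :=
  ((PySem.List.enumerate cs).filter
    (fun p => PySem.Chars.isIn [p.2] ['.', '!', '?'])).map (fun p => p.1)

-- the hand-rolled bisect_left while-loop of B; bounds[m] is always in range
-- (0 ≤ a ≤ m < b ≤ len(bounds)), so pyGetD is exact
def pvBisect (bounds : List Int) (lo : Int) (a b : Int) : Int :=
  if h : a < b then
    let m := PySem.Int.floordiv (a + b) 2
    if PySem.List.pyGetD bounds m 0 < lo then pvBisect bounds lo (m + 1) b
    else pvBisect bounds lo a m
  else a
termination_by (b - a).toNat
decreasing_by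
  · have hm := (PySem.Int.floordiv_two_mid_bounds (le_of_lt h)).1
    omega
  · have hlt : PySem.Int.floordiv (a + b) 2 < b :=
      (PySem.Int.floordiv_lt_iff_lt_mul (by omega)).mpr (by omega)
    omega

def pvLoopB (cs : List Char) (bounds : List Int) (seg : List Char)
    (start_pos end_pos : Int) : List String → Int
  | [] => end_pos
  | ind :: rest =>
      let pos := PySem.Chars.find seg ind.toList
      if pos = -1 then pvLoopB cs bounds seg start_pos end_pos rest
      else
        let lo := start_pos + pos + (ind.toList.length : Int)
        let hi := min (cs.length : Int) (start_pos + pos + 300)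
        let a := pvBisect bounds lo 0 (bounds.length : Int)
        if a < (bounds.length : Int) ∧ PySem.List.pyGetD bounds a 0 < hi then
          PySem.List.pyGetD bounds a 0 + 1
        else lo + 100

def find_section_boundary_py_alt (text : String) (indicators : List String) (start_pos : Int) (end_pos : Int) : Int :=
  pvLoopB text.toList (pvBounds text.toList)
    (PySem.Chars.lower (PySem.Chars.slice text.toList (some start_pos) (some end_pos)))
    start_pos end_pos indicators

-- ===== PRECONDITION & SPEC =====
-- Pre_ excludes negative start_pos: there A's inner scan indexes text[i] at negative i,
-- raising IndexError when i < -len(text) and otherwise returning positions taken from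
-- Python's accidental negative-index wraparound (pos is relative to a slice measured from
-- the string's END, so actual_pos = start_pos + pos points at the wrong place); B's
-- boundary index naturally measures positions from the string's start instead.
def Pre_find_section_boundary_py (text : String) (indicators : List String) (start_pos : Int) (end_pos : Int) : Prop :=
  0 ≤ start_pos
instance (text : String) (indicators : List String) (start_pos : Int) (end_pos : Int) : Decidable (Pre_find_section_boundary_py text indicators start_pos end_pos) := by unfold Pre_find_section_boundary_py; infer_instance

def pvWitness_find_section_boundary_py : String × List String × Int × Int := ("hello. world", ["lo"], 0, 12)

def Spec_find_section_boundary_py (text : String) (indicators : List String) (start_pos : Int) (end_pos : Int) (out : Int) : Prop := out = find_section_boundary_py_alt text indicators start_pos end_pos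
instance (text : String) (indicators : List String) (start_pos : Int) (end_pos : Int) (out : Int) : Decidable (Spec_find_section_boundary_py text indicators start_pos end_pos out) := by unfold Spec_find_section_boundary_py; infer_instance

-- ===== CLAIM (what is proved, stated in full; the proofs are below) =====
def Claim_equal_find_section_boundary_py : Prop := ∀ (text : String) (indicators : List String) (start_pos : Int) (end_pos : Int), Dom_find_section_boundary_py text indicators start_pos end_pos → Pre_find_section_boundary_py text indicators start_pos end_pos → Spec_find_section_boundary_py text indicators start_pos end_pos (find_section_boundary_py text indicators start_pos end_pos)

-- ===== LEMMAS AND PROOFS =====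

-- 'position x is a sentence boundary of cs' (the shared predicate of both ports)
def pvIsB (cs : List Char) (x : Int) : Prop :=
  0 ≤ x ∧ x < (cs.length : Int) ∧
    PySem.Chars.isIn [PySem.List.pyGetD cs x ' '] ['.', '!', '?'] = true

-- membership in the boundary index
theorem pvBounds_mem (cs : List Char) (x : Int) : x ∈ pvBounds cs ↔ pvIsB cs x := by
  unfold pvBounds pvIsB
  simp only [List.mem_map, List.mem_filter, PySem.List.mem_enumerate_iff]
  constructor
  · rintro ⟨⟨i, c⟩, ⟨⟨k, hk, hpq⟩, hc⟩, rfl⟩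
    cases hpq
    simp only [zero_add] at hc ⊢
    refine ⟨by omega, by exact_mod_cast hk, ?_⟩
    rw [PySem.List.pyGetD_eq_getElem cs ' ' (by omega) (by exact_mod_cast hk)]
    simpa using hc
  · rintro ⟨h0, hlt, hc⟩
    refine ⟨(x, cs[x.toNat]'(by omega)), ⟨⟨x.toNat, by omega, by simp; omega⟩, ?_⟩, rfl⟩
    rw [PySem.List.pyGetD_eq_getElem cs ' ' h0 hlt] at hc
    simpa using hc

-- the boundary index is strictly sorted
theorem pvBounds_sorted (cs : List Char) : (pvBounds cs).Pairwise (· < ·) := by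
  unfold pvBounds
  rw [List.pairwise_map]
  exact (PySem.List.pairwise_lt_enumerate cs 0).filter _

-- bisect_left spec: the result splits the sorted index at lo
theorem pvBisect_spec (bounds : List Int) (lo : Int)
    (hsort : bounds.Pairwise (· < ·)) :
    ∀ (fuel : Nat) (a b : Int), (b - a).toNat = fuel → 0 ≤ a → a ≤ b →
      b ≤ (bounds.length : Int) →
      (∀ (i : Nat) (h : i < bounds.length), (i : Int) < a → bounds[i] < lo) →
      (∀ (i : Nat) (h : i < bounds.length), b ≤ (i : Int) → lo ≤ bounds[i]) →
      a ≤ pvBisect bounds lo a b ∧ pvBisect bounds lo a b ≤ b ∧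
      (∀ (i : Nat) (h : i < bounds.length), (i : Int) < pvBisect bounds lo a b → bounds[i] < lo) ∧
      (∀ (i : Nat) (h : i < bounds.length), pvBisect bounds lo a b ≤ (i : Int) → lo ≤ bounds[i]) := by
  intro fuel
  induction fuel using Nat.strong_induction_on with
  | _ fuel ih =>
      intro a b hfuel h0 hab hblen hlow hhigh
      rw [pvBisect]
      by_cases h : a < b
      · rw [dif_pos h]
        have hm := PySem.Int.floordiv_two_mid_bounds (le_of_lt h)
        have hmb : PySem.Int.floordiv (a + b) 2 < b :=
          (PySem.Int.floordiv_lt_iff_lt_mul (by omega)).mpr (by omega)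
        set m := PySem.Int.floordiv (a + b) 2 with hmdef
        have hmlen : m < (bounds.length : Int) := by omega
        have hget : PySem.List.pyGetD bounds m 0 = bounds[m.toNat] :=
          PySem.List.pyGetD_eq_getElem bounds 0 (by omega) hmlen
        have hsortg := List.pairwise_iff_getElem.mp hsort
        by_cases hc : PySem.List.pyGetD bounds m 0 < lo
        · rw [if_pos hc]
          have := ih ((b - (m + 1)).toNat) (by omega) (m + 1) b rfl (by omega) (by omega) hblen
            (fun i hilen hia => by
              have hle : bounds[i] ≤ bounds[m.toNat]'(by omega) := by
                rcases Nat.lt_trichotomy i m.toNat with hl | he | hg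
                · exact le_of_lt (hsortg i m.toNat hilen (by omega) hl)
                · subst he; exact le_refl _
                · omega
              rw [hget] at hc; omega)
            hhigh
          obtain ⟨q1, q2, q3, q4⟩ := this
          exact ⟨by omega, by omega, q3, q4⟩
        · rw [if_neg hc]
          have := ih ((m - a).toNat) (by omega) a m rfl h0 (by omega) (by omega) hlow
            (fun i hilen him => by
              have hge : bounds[m.toNat]'(by omega) ≤ bounds[i] := by
                rcases Nat.lt_trichotomy i m.toNat with hl | he | hg
                · omega
                · subst he; exact le_refl _
                · exact le_of_lt (hsortg m.toNat i (by omega) hilen hg)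
              rw [hget] at hc; omega)
          obtain ⟨q1, q2, q3, q4⟩ := this
          exact ⟨by omega, by omega, q3, q4⟩
      · rw [dif_neg h]
        have hae : a = b := by omega
        exact ⟨le_refl a, by omega, fun i hl hia => hlow i hl hia,
          fun i hl hia => hhigh i hl (by omega)⟩

-- A's character scan over [lo, hi) returns the first boundary ≥ lo (as characterised by j)
-- +1 if it falls inside the window, none otherwise
theorem pvScanA_eq (cs : List Char) (hi : Int) (hhi : hi ≤ (cs.length : Int)) :
    ∀ (fuel : Nat) (lo : Int) (j : Option Int), (hi - lo).toNat = fuel → 0 ≤ lo →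
      (match j with
       | some x => lo ≤ x ∧ pvIsB cs x ∧ ∀ y, lo ≤ y → y < x → ¬ pvIsB cs y
       | none => ∀ y, lo ≤ y → ¬ pvIsB cs y) →
      pvScanA cs (PySem.List.pyRange lo hi 1) =
        (match j with
         | some x => if x < hi then some (x + 1) else none
         | none => none) := by
  intro fuel
  induction fuel with
  | zero =>
      intro lo j hfuel h0 hj
      have hle : hi ≤ lo := by omega
      rw [PySem.List.pyRange_one_eq_nil hle]
      cases j with
      | none => rfl
      | some x =>
          obtain ⟨hlx, _, _⟩ := hj
          show pvScanA cs [] = if x < hi then some (x + 1) else none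
          rw [if_neg (by omega)]
          rfl
  | succ fuel ih =>
      intro lo j hfuel h0 hj
      have hlt : lo < hi := by omega
      rw [PySem.List.pyRange_one_cons hlt]
      show (if PySem.Chars.isIn [PySem.List.pyGetD cs lo ' '] ['.', '!', '?'] then some (lo + 1)
            else pvScanA cs (PySem.List.pyRange (lo + 1) hi 1)) = _
      by_cases hb : PySem.Chars.isIn [PySem.List.pyGetD cs lo ' '] ['.', '!', '?'] = true
      · rw [if_pos hb]
        have hblo : pvIsB cs lo := ⟨h0, by omega, hb⟩
        cases j with
        | none => exact absurd hblo (hj lo (le_refl lo))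
        | some x =>
            obtain ⟨hlx, hbx, hmin⟩ := hj
            have hxlo : x = lo := by
              by_contra hne
              exact hmin lo (le_refl lo) (by omega) hblo
            subst hxlo
            show some (x + 1) = if x < hi then some (x + 1) else none
            rw [if_pos hlt]
      · rw [if_neg hb]
        have hnlo : ¬ pvIsB cs lo := fun h => hb h.2.2
        apply ih (lo + 1) j (by omega) (by omega)
        cases j with
        | none =>
            intro y hy
            exact hj y (by omega)
        | some x =>
            obtain ⟨hlx, hbx, hmin⟩ := hj
            refine ⟨?_, hbx, fun y hy hyx => hmin y (by omega) hyx⟩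
            rcases eq_or_lt_of_le hlx with rfl | h
            · exact absurd hbx hnlo
            · omega

-- the two outer indicator loops agree
theorem pvLoops (cs seg : List Char) (start_pos end_pos : Int) (h0 : 0 ≤ start_pos)
    (inds : List String) :
    pvLoopA cs seg start_pos end_pos inds =
      pvLoopB cs (pvBounds cs) seg start_pos end_pos inds := by
  induction inds with
  | nil => rfl
  | cons ind rest ih =>
      simp only [pvLoopA, pvLoopB]
      by_cases hpos : PySem.Chars.find seg ind.toList = -1
      · rw [if_neg (by simpa using hpos), if_pos hpos]
        exact ih
      · rw [if_pos hpos, if_neg hpos]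
        have hpos0 : 0 ≤ PySem.Chars.find seg ind.toList := by
          have := PySem.Chars.neg_one_le_find seg ind.toList
          omega
        set pos := PySem.Chars.find seg ind.toList with hposdef
        set lo := start_pos + pos + (ind.toList.length : Int) with hlo
        set hi := min (cs.length : Int) (start_pos + pos + 300) with hhi
        set bounds := pvBounds cs with hbdef
        have hsort : bounds.Pairwise (· < ·) := pvBounds_sorted cs
        obtain ⟨hr0, hrb, hrlow, hrhigh⟩ := pvBisect_spec bounds lo hsort
          (((bounds.length : Int) - 0).toNat) 0 (bounds.length : Int) rfl (le_refl 0)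
          (by exact_mod_cast Nat.zero_le _) (le_refl _)
          (fun i hl hia => absurd hia (by omega))
          (fun i hl hia => absurd hia (by omega))
        set r := pvBisect bounds lo 0 (bounds.length : Int) with hrdef
        have hj : (match (if h : r < (bounds.length : Int) then some (bounds[r.toNat]'(by omega)) else none : Option Int) with
             | some x => lo ≤ x ∧ pvIsB cs x ∧ ∀ y, lo ≤ y → y < x → ¬ pvIsB cs y
             | none => ∀ y, lo ≤ y → ¬ pvIsB cs y) := by
          by_cases hrn : r < (bounds.length : Int)
          · rw [dif_pos hrn]
            have hrt : r.toNat < bounds.length := by omega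
            refine ⟨hrhigh r.toNat hrt (by omega), ?_, ?_⟩
            · exact (pvBounds_mem cs _).mp (List.getElem_mem hrt)
            · intro y hy hyx hby
              have hmem : y ∈ bounds := (pvBounds_mem cs y).mpr hby
              obtain ⟨i, hil, hie⟩ := List.getElem_of_mem hmem
              have hsortg := List.pairwise_iff_getElem.mp hsort
              have hir : i < r.toNat := by
                by_contra hge
                rcases Nat.lt_or_ge r.toNat i with hgt | hle2
                · have := hsortg r.toNat i hrt hil hgt; omega
                · have hieq : i = r.toNat := by omega
                  subst hieq; omega
              have := hrlow i hil (by omega)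
              omega
          · rw [dif_neg hrn]
            intro y hy hby
            have hmem : y ∈ bounds := (pvBounds_mem cs y).mpr hby
            obtain ⟨i, hil, hie⟩ := List.getElem_of_mem hmem
            have := hrlow i hil (by omega)
            omega
        have hkey := pvScanA_eq cs hi (min_le_left _ _) ((hi - lo).toNat) lo _ rfl (by omega) hj
        by_cases hrn : r < (bounds.length : Int)
        · have hrt : r.toNat < bounds.length := by omega
          have hget : PySem.List.pyGetD bounds r 0 = bounds[r.toNat] :=
            PySem.List.pyGetD_eq_getElem bounds 0 (by omega) hrn
          have hkey2 : pvScanA cs (PySem.List.pyRange lo hi 1) =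
              if bounds[r.toNat]'hrt < hi then some (bounds[r.toNat]'hrt + 1) else none := by
            rw [hkey, dif_pos hrn]
          rw [hkey2]
          by_cases hwin : bounds[r.toNat]'hrt < hi
          · rw [if_pos hwin]
            show bounds[r.toNat]'hrt + 1 = _
            rw [if_pos ⟨hrn, by rw [hget]; exact hwin⟩, hget]
          · rw [if_neg hwin]
            show lo + 100 = _
            rw [if_neg (fun hc => hwin (by rw [← hget]; exact hc.2))]
        · have hkey2 : pvScanA cs (PySem.List.pyRange lo hi 1) = none := by
            rw [hkey, dif_neg hrn]
          rw [hkey2]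
          show lo + 100 = _
          rw [if_neg (fun hc => hrn hc.1)]

-- ===== VERDICT (by name: the statement is the Claim_ definition above) =====
theorem find_section_boundary_py_spec : Claim_equal_find_section_boundary_py := by
  intro text indicators start_pos end_pos _ hpre
  unfold Spec_find_section_boundary_py find_section_boundary_py find_section_boundary_py_alt
  exact pvLoops _ _ _ _ hpre indicators
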